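-- pv_equiv track=rewrite | github.com/AntonJansen96/GLIC | analysis/specialPlot.py | calcLetter
-- ===== SOURCE A (Python) =====
-- def calcLetter(letter, type):
--     N = ['A', 'B', 'C', 'D', 'E']
--     C = ['E', 'A', 'B', 'C', 'D']
--     P = ['B', 'C', 'D', 'E', 'A']
--
--     if type == 'c':
--         for idx in range(0, len(N)):
--             if letter == N[idx]:
--                 return C[idx]
--
--     elif type == 'p':
--         for idx in range(0, len(N)):
--             if letter == N[idx]:
--                 return P[idx]
-- ===== SOURCE B (Python) =====
-- def calcLetter(letter, type):
--     if letter in {'A', 'B', 'C', 'D', 'E'} and type in ('c', 'p'):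
--         idx = ord(letter) - ord('A')
--         shift = -1 if type == 'c' else 1
--         return chr((idx + shift) % 5 + ord('A'))
--     return None
-- ===== Notes on version B (the rewrite author's own statement) =====
-- stated objective: simpler
-- what changed: Replaces the three parallel letter tables and linear scans with a closed-form ord/chr modular shift guarded by a set-membership test.
import Mathlib
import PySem

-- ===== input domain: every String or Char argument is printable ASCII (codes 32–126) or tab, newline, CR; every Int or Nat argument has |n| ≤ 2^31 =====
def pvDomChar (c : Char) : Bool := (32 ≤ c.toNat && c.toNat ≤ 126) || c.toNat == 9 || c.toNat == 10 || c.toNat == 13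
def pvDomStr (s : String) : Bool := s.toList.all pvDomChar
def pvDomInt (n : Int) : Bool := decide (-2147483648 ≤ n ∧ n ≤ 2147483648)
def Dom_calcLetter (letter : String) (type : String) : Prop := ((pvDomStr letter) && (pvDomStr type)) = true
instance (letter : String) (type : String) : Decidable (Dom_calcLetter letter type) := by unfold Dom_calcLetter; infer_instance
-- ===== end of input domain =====

-- B replaces A's three parallel letter tables and linear scans by a closed-form ord/chr modular shift (simpler).

-- ===== PORT A =====
def calcLetter (letter : String) (type : String) : Option String :=
  let N := ["A", "B", "C", "D", "E"]
  let C := ["E", "A", "B", "C", "D"]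
  let P := ["B", "C", "D", "E", "A"]
  if type = "c" then
    (PySem.List.pyRange 0 (N.length : Int) 1).findSome? (fun idx =>
      if some letter = PySem.List.pyGet? N idx then PySem.List.pyGet? C idx else none)
  else if type = "p" then
    (PySem.List.pyRange 0 (N.length : Int) 1).findSome? (fun idx =>
      if some letter = PySem.List.pyGet? N idx then PySem.List.pyGet? P idx else none)
  else none

-- ===== PORT B =====
def calcLetter_alt (letter : String) (type : String) : Option String :=
  if letter ∈ ["A", "B", "C", "D", "E"] ∧ (type = "c" ∨ type = "p") then
    let idx : Int := Int.ofNat (letter.toList.headD 'A').toNat - 65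
    let shift : Int := if type = "c" then -1 else 1
    some (String.mk [Char.ofNat ((PySem.Int.mod (idx + shift) 5).toNat + 65)])
  else none

-- ===== PRECONDITION & SPEC =====
def Spec_calcLetter (letter : String) (type : String) (out : Option String) : Prop := out = calcLetter_alt letter type
instance (letter : String) (type : String) (out : Option String) : Decidable (Spec_calcLetter letter type out) := by unfold Spec_calcLetter; infer_instance

-- ===== CLAIM (what is proved, stated in full; the proofs are below) =====
def Claim_equal_calcLetter : Prop := ∀ (letter : String) (type : String), Dom_calcLetter letter type → Spec_calcLetter letter type (calcLetter letter type)

-- ===== LEMMAS AND PROOFS =====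
theorem calcLetter_case (type : String) (ht : type = "c" ∨ type = "p") :
    ∀ letter : String, calcLetter letter type = calcLetter_alt letter type := by
  intro letter
  by_cases hm : letter ∈ ["A", "B", "C", "D", "E"]
  · simp only [List.mem_cons, List.not_mem_nil, or_false] at hm
    rcases ht with ht | ht <;> subst ht <;>
      rcases hm with h | h | h | h | h <;> subst h <;> decide
  · have h1 : letter ≠ "A" := fun h => hm (by simp [h])
    have h2 : letter ≠ "B" := fun h => hm (by simp [h])
    have h3 : letter ≠ "C" := fun h => hm (by simp [h])
    have h4 : letter ≠ "D" := fun h => hm (by simp [h])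
    have h5 : letter ≠ "E" := fun h => hm (by simp [h])
    have hrange : PySem.List.pyRange 0 (5 : Int) 1 = [0, 1, 2, 3, 4] := by decide
    rcases ht with ht | ht <;> subst ht <;>
      simp [calcLetter, calcLetter_alt, hrange, List.findSome?,
        PySem.List.pyGet?, PySem.List.pyIdx?, h1, h2, h3, h4, h5, hm]

-- ===== VERDICT (by name: the statement is the Claim_ definition above) =====
theorem calcLetter_spec : Claim_equal_calcLetter := by
  intro letter type _
  unfold Spec_calcLetter
  by_cases hc : type = "c"
  · exact calcLetter_case type (Or.inl hc) letter
  · by_cases hp : type = "p"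
    · exact calcLetter_case type (Or.inr hp) letter
    · simp [calcLetter, calcLetter_alt, hc, hp]
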